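-- pv_equiv track=rewrite | github.com/pypi-data/pypi-mirror-72 | packages/JsonToMarkdown/JsonToMarkdown-1.1.2.tar.gz/JsonToMarkdown-1.1.2/JsonToMarkdown/main.py | get_group_path
-- ===== SOURCE A (Python) =====
-- def get_group_path(in_path):
--     tmp = []
--     for n,v in enumerate(in_path.split("/")):
--         if v == "group_reg":
--             tmp.append(n)
--     path = []
--     if tmp != []:
--         for i in tmp:
--             path.append("/".join(in_path.split("/")[:i]))
--     return path
-- ===== SOURCE B (Python) =====
-- def get_group_path(in_path):
--     path = []
--     prefix = None
--     for v in in_path.split("/"):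
--         if v == "group_reg":
--             path.append(prefix if prefix is not None else "")
--         prefix = v if prefix is None else prefix + "/" + v
--     return path
-- ===== Notes on version B (the rewrite author's own statement) =====
-- stated objective: simpler
-- what changed: Replaces A's two-phase scheme (collect the indices of the marker segment, then for each index re-split the path and join the prefix slice) by a single pass over the segments that maintains a running prefix string (None sentinel before the first segment) and appends it whenever the marker segment is seen.
import Mathlib
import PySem

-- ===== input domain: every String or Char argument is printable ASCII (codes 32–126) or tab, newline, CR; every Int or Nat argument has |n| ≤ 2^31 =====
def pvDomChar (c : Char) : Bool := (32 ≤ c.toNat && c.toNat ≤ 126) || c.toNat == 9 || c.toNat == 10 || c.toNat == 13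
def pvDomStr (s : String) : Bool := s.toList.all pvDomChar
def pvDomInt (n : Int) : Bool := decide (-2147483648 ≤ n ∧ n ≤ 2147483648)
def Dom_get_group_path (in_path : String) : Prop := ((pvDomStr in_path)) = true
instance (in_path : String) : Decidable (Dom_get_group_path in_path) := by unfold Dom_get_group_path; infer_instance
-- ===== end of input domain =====

-- B replaces A's two-phase index-collection-and-rescan (with its repeated re-splitting and
-- prefix re-joins) by a single pass over the split segments maintaining a running prefix
-- string; objective: simpler.


-- ===== PORT A =====
-- in_path.split("/"): the separator "/" is non-empty, so split? is always `some`; getD is never hit.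
def get_group_path (in_path : String) : List String :=
  let tmp : List Int :=
    (PySem.List.enumerate ((PySem.Str.split? in_path "/").getD []) 0).foldl
      (fun acc nv => if nv.2 == "group_reg" then acc ++ [nv.1] else acc) []
  if tmp ≠ [] then
    tmp.foldl (fun acc i =>
      acc ++ [PySem.Str.join "/"
        (PySem.List.slice ((PySem.Str.split? in_path "/").getD []) none (some i))]) []
  else []

-- ===== PORT B =====
-- state = (prefix : Option String  — None until the first segment —, path so far)
def get_group_path_alt (in_path : String) : List String :=
  (((PySem.Str.split? in_path "/").getD []).foldl
    (fun st v =>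
      (some (match st.1 with | none => v | some p => p ++ "/" ++ v),
       if v == "group_reg" then st.2 ++ [st.1.getD ""] else st.2))
    ((none : Option String), ([] : List String))).2

-- ===== PRECONDITION & SPEC =====
def Spec_get_group_path (in_path : String) (out : List String) : Prop := out = get_group_path_alt in_path
instance (in_path : String) (out : List String) : Decidable (Spec_get_group_path in_path out) := by unfold Spec_get_group_path; infer_instance

-- ===== CLAIM (what is proved, stated in full; the proofs are below) =====
def Claim_equal_get_group_path : Prop := ∀ (in_path : String), Dom_get_group_path in_path → Spec_get_group_path in_path (get_group_path in_path)

-- ===== LEMMAS AND PROOFS =====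

-- common recursive specification: walk the segments with the list `done` of segments already seen
def gpGo : List String → List String → List String
  | _, [] => []
  | done, v :: rest =>
      (if v == "group_reg" then [PySem.Str.join "/" done] else []) ++ gpGo (done ++ [v]) rest

theorem str_join_nil : PySem.Str.join "/" [] = "" := by
  apply String.ext
  simp [PySem.Str.toList_join, PySem.Chars.join_nil]

theorem str_join_singleton (v : String) : PySem.Str.join "/" [v] = v := by
  apply String.ext
  simp [PySem.Str.toList_join, PySem.Chars.join_singleton]

theorem chars_join_append (sep : List Char) (l : List (List Char)) (v : List Char) (h : l ≠ []) :
    PySem.Chars.join sep (l ++ [v]) = PySem.Chars.join sep l ++ sep ++ v := by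
  induction l with
  | nil => exact absurd rfl h
  | cons a l ih =>
    cases l with
    | nil => simp [PySem.Chars.join_cons_cons, PySem.Chars.join_singleton]
    | cons b l' =>
      simp only [List.cons_append] at ih ⊢
      rw [PySem.Chars.join_cons_cons sep a b (l' ++ [v]), ih (by simp),
          PySem.Chars.join_cons_cons]
      simp [List.append_assoc]

theorem str_join_append (l : List String) (v : String) (h : l ≠ []) :
    PySem.Str.join "/" (l ++ [v]) = PySem.Str.join "/" l ++ "/" ++ v := by
  apply String.ext
  have : l.map String.toList ≠ [] := by simpa using h
  simp [PySem.Str.toList_join, chars_join_append _ _ _ this]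

-- A's merged loops over any suffix compute gpGo
theorem a_loop (rest : List String) : ∀ (done parts : List String), done ++ rest = parts →
    ((PySem.List.enumerate rest (done.length : Int)).filter
        (fun nv => nv.2 == "group_reg")).map
      (fun nv => PySem.Str.join "/" (PySem.List.slice parts none (some nv.1)))
      = gpGo done rest := by
  induction rest with
  | nil => intro done parts _; simp [gpGo, PySem.List.enumerate]
  | cons v rest ih =>
    intro done parts hp
    have hstep : ((done ++ [v]).length : Int) = (done.length : Int) + 1 := by simp
    have htake : PySem.List.slice parts none (some (done.length : Int)) = done := by
      rw [PySem.List.slice_to_natCast, ← hp, List.take_left]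
    rw [PySem.List.enumerate_cons, ← hstep]
    by_cases hv : v = "group_reg"
    · subst hv
      simp only [List.filter_cons, beq_self_eq_true, if_pos, List.map_cons, gpGo]
      rw [htake, ih (done ++ ["group_reg"]) parts (by simpa using hp)]
      simp
    · have : (v == "group_reg") = false := by simpa using hv
      simp only [List.filter_cons, this, gpGo, if_neg, Bool.false_eq_true, not_false_iff]
      rw [ih (done ++ [v]) parts (by simpa using hp)]
      simp

-- B's loop over any suffix appends gpGo, under the prefix invariant
theorem b_loop (rest : List String) : ∀ (done : List String) (acc : List String),
    (rest.foldl
      (fun st v =>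
        (some (match st.1 with | none => v | some p => p ++ "/" ++ v),
         if v == "group_reg" then st.2 ++ [st.1.getD ""] else st.2))
      ((if done = [] then none else some (PySem.Str.join "/" done)), acc)).2
      = acc ++ gpGo done rest := by
  induction rest with
  | nil => intro done acc; simp [gpGo]
  | cons v rest ih =>
    intro done acc
    have hpre :
        (some (match (if done = [] then none else some (PySem.Str.join "/" done)) with
               | none => v | some p => p ++ "/" ++ v) : Option String)
        = (if done ++ [v] = [] then none else some (PySem.Str.join "/" (done ++ [v]))) := by
      by_cases hd : done = []
      · subst hd; simp [str_join_singleton]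
      · simp [hd, str_join_append done v hd]
    have hgetD :
        ((if done = [] then none else some (PySem.Str.join "/" done)) : Option String).getD ""
          = PySem.Str.join "/" done := by
      by_cases hd : done = []
      · subst hd; simp [str_join_nil]
      · simp [hd]
    simp only [List.foldl_cons, hpre, hgetD]
    by_cases hv : v = "group_reg"
    · subst hv
      simp only [beq_self_eq_true, if_pos, ih (done ++ ["group_reg"])]
      simp [gpGo]
    · have hb : (v == "group_reg") = false := by simpa using hv
      simp only [hb, Bool.false_eq_true, if_neg, not_false_iff, ih (done ++ [v])]
      simp [gpGo, hb]

theorem a_eq_gpGo (in_path : String) :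
    get_group_path in_path = gpGo [] ((PySem.Str.split? in_path "/").getD []) := by
  have key := a_loop ((PySem.Str.split? in_path "/").getD []) []
      ((PySem.Str.split? in_path "/").getD []) rfl
  simp only [List.length_nil, Nat.cast_zero] at key
  simp only [get_group_path, PySem.List.foldl_append_if,
    PySem.List.foldl_append_singleton_eq_map, List.nil_append, List.map_map]
  split_ifs with h
  · rw [← key]; rfl
  · simp only [ne_eq, not_not, List.map_eq_nil_iff] at h
    rw [← key, h, List.map_nil]

theorem b_eq_gpGo (in_path : String) :
    get_group_path_alt in_path = gpGo [] ((PySem.Str.split? in_path "/").getD []) := by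
  unfold get_group_path_alt
  have := b_loop ((PySem.Str.split? in_path "/").getD []) [] []
  simpa using this

-- ===== VERDICT (by name: the statement is the Claim_ definition above) =====
theorem get_group_path_spec : Claim_equal_get_group_path := by
  intro in_path _
  unfold Spec_get_group_path
  rw [a_eq_gpGo, b_eq_gpGo]
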